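-- pv_equiv track=rewrite | github.com/MohamadZeina/ucl_eye | frame_integrity_check/render17_monitor.py | prev_frame_in_cluster
-- ===== SOURCE A (Python) =====
-- CLUSTER_GAP = 100           # frame gap > this = new render frontier
--
-- def prev_frame_in_cluster(frame_num, all_sorted):
--     """Find the immediately preceding frame in the same cluster."""
--     idx = None
--     for i, n in enumerate(all_sorted):
--         if n == frame_num:
--             idx = i
--             break
--     if idx is None or idx == 0:
--         return None
--     prev = all_sorted[idx - 1]
--     if frame_num - prev > CLUSTER_GAP:
--         return None
--     return prev
-- ===== SOURCE B (Python) =====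
-- CLUSTER_GAP = 100
--
--
-- def prev_frame_in_cluster(frame_num, all_sorted):
--     """Find the immediately preceding frame in the same cluster.
--
--     Binary search (bisect_left) instead of a linear scan: all_sorted is
--     non-decreasing, so the leftmost index with value >= frame_num is the
--     first occurrence of frame_num whenever it is present.
--     """
--     lo, hi = 0, len(all_sorted)
--     while lo < hi:
--         mid = (lo + hi) // 2
--         if all_sorted[mid] < frame_num:
--             lo = mid + 1
--         else:
--             hi = mid
--     if lo == 0 or lo == len(all_sorted) or all_sorted[lo] != frame_num:
--         return None
--     prev = all_sorted[lo - 1]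
--     if frame_num - prev > CLUSTER_GAP:
--         return None
--     return prev
-- ===== Notes on version B (the rewrite author's own statement) =====
-- stated objective: faster
-- what changed: A scans the list linearly for the index of frame_num; B runs a hand-rolled bisect_left binary search for the leftmost element >= frame_num, which on the sorted input is frame_num's first occurrence, then checks presence and the gap.
-- outside the precondition, e.g. on prev_frame_in_cluster(2, [3, 2]): A returns 3, B returns None
import Mathlib
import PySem

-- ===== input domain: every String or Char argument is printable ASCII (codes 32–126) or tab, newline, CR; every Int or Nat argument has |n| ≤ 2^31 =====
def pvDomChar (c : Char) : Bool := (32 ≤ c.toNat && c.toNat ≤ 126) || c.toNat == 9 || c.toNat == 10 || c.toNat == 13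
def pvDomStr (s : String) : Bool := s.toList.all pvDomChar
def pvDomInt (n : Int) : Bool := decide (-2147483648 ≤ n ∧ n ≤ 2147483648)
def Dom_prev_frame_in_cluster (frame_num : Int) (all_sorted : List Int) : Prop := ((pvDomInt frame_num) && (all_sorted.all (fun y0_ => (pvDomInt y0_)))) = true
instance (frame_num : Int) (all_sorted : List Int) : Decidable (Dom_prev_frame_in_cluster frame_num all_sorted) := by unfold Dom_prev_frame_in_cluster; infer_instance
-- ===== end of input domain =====

-- B replaces A's linear scan by a hand-rolled bisect_left binary search on the
-- (non-decreasing) input list; equivalence is proved on sorted lists (Pre_).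

-- ===== PORT A =====
-- the enumerate/break loop of A: first index at which frame_num occurs
def pvFindIdxA (frame_num : Int) : List Int → Nat → Option Nat
  | [], _ => none
  | n :: rest, i => if n == frame_num then some i else pvFindIdxA frame_num rest (i + 1)

def prev_frame_in_cluster (frame_num : Int) (all_sorted : List Int) : Option Int :=
  match pvFindIdxA frame_num all_sorted 0 with
  | none => none
  | some idx =>
    if idx = 0 then none
    else
      match PySem.List.pyGet? all_sorted ((idx : Int) - 1) with
      | none => none  -- unreachable: idx - 1 is in range
      | some prev => if frame_num - prev > 100 then none else some prev

-- ===== PORT B =====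
-- the while-loop of Source B: bisect_left, state (lo, hi); the fuel only makes the
-- recursion structural — hi - lo shrinks each turn, so fuel = hi - lo suffices
def pvBisectGo (frame_num : Int) (l : List Int) : Nat → Nat → Nat → Nat
  | 0, lo, _ => lo
  | fuel + 1, lo, hi =>
    if lo < hi then
      match PySem.List.pyGet? l (((lo + hi) / 2 : Nat) : Int) with
      | none => lo  -- unreachable: the loop keeps lo < hi ≤ l.length, so mid is in range
      | some v =>
        if v < frame_num then pvBisectGo frame_num l fuel ((lo + hi) / 2 + 1) hi
        else pvBisectGo frame_num l fuel lo ((lo + hi) / 2)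
    else lo

def pvBisect (frame_num : Int) (l : List Int) (lo hi : Nat) : Nat :=
  pvBisectGo frame_num l (hi - lo) lo hi

def prev_frame_in_cluster_alt (frame_num : Int) (all_sorted : List Int) : Option Int :=
  let lo := pvBisect frame_num all_sorted 0 all_sorted.length
  if lo = 0 ∨ lo = all_sorted.length then none
  else
    match PySem.List.pyGet? all_sorted (lo : Int) with
    | none => none  -- unreachable: lo < all_sorted.length here
    | some v =>
      if v ≠ frame_num then none
      else
        match PySem.List.pyGet? all_sorted ((lo : Int) - 1) with
        | none => none  -- unreachable: 1 ≤ lo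
        | some prev => if frame_num - prev > 100 then none else some prev

-- ===== PRECONDITION & SPEC =====
-- Pre_ excludes only lists that are NOT non-decreasing yet DO contain frame_num:
-- sorted input is the function's documented domain (the parameter is 'all_sorted'),
-- and on an unsorted list containing frame_num A's scan-order value is an
-- implementation artefact a binary search legitimately need not reproduce
-- (when frame_num is absent both return None on any list, so those stay inside).
def Pre_prev_frame_in_cluster (frame_num : Int) (all_sorted : List Int) : Prop :=
  all_sorted.Pairwise (· ≤ ·) ∨ frame_num ∉ all_sorted
instance (frame_num : Int) (all_sorted : List Int) : Decidable (Pre_prev_frame_in_cluster frame_num all_sorted) := by unfold Pre_prev_frame_in_cluster; infer_instance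

def pvWitness_prev_frame_in_cluster : Int × List Int := (5, [1, 5, 9])

def Spec_prev_frame_in_cluster (frame_num : Int) (all_sorted : List Int) (out : Option Int) : Prop := out = prev_frame_in_cluster_alt frame_num all_sorted
instance (frame_num : Int) (all_sorted : List Int) (out : Option Int) : Decidable (Spec_prev_frame_in_cluster frame_num all_sorted out) := by unfold Spec_prev_frame_in_cluster; infer_instance

-- ===== CLAIM (what is proved, stated in full; the proofs are below) =====
def Claim_equal_prev_frame_in_cluster : Prop := ∀ (frame_num : Int) (all_sorted : List Int), Dom_prev_frame_in_cluster frame_num all_sorted → Pre_prev_frame_in_cluster frame_num all_sorted → Spec_prev_frame_in_cluster frame_num all_sorted (prev_frame_in_cluster frame_num all_sorted)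

-- ===== LEMMAS AND PROOFS =====

theorem pvFindIdxA_shift (fn : Int) : ∀ (l : List Int) (i : Nat),
    pvFindIdxA fn l (i + 1) = (pvFindIdxA fn l i).map (· + 1) := by
  intro l
  induction l with
  | nil => intro i; simp [pvFindIdxA]
  | cons b t ih =>
    intro i
    by_cases h : b == fn <;> simp [pvFindIdxA, h, ih]

theorem pvFindIdxA_none (fn : Int) : ∀ (l : List Int),
    (∀ x ∈ l, x ≠ fn) → pvFindIdxA fn l 0 = none := by
  intro l
  induction l with
  | nil => intro _; simp [pvFindIdxA]
  | cons b t ih =>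
    intro h
    have hb : ¬ (b == fn) = true := by
      simp only [beq_iff_eq]; exact h b (by simp)
    simp only [pvFindIdxA, hb]
    rw [show (0 + 1 : Nat) = 0 + 1 from rfl, pvFindIdxA_shift,
      ih (fun x hx => h x (by simp [hx]))]
    rfl

theorem pvFindIdxA_some (fn : Int) : ∀ (l : List Int) (j : Nat) (hj : j < l.length),
    l[j] = fn → (∀ (i : Nat) (hi : i < l.length), i < j → l[i] ≠ fn) →
    pvFindIdxA fn l 0 = some j := by
  intro l
  induction l with
  | nil => intro j hj; simp at hj
  | cons b t ih =>
    intro j hj hval hbefore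
    cases j with
    | zero => simp at hval; simp [pvFindIdxA, hval]
    | succ k =>
      have hb : ¬ (b == fn) = true := by
        simp only [beq_iff_eq]
        exact hbefore 0 (by simp) (Nat.succ_pos k)
      simp only [pvFindIdxA, hb]
      rw [show (0 + 1 : Nat) = 0 + 1 from rfl, pvFindIdxA_shift,
        ih k (by simpa using Nat.lt_of_succ_lt_succ hj) (by simpa using hval)
          (fun i hi hik => by
            have := hbefore (i + 1) (by simpa using Nat.succ_lt_succ hi)
              (Nat.succ_lt_succ hik)
            simpa using this)]
      rfl

-- bisect_left invariant: the result r splits l into l[<r] < fn and fn ≤ l[≥r]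
theorem pvBisectGo_le (fn : Int) (l : List Int) :
    ∀ (fuel lo hi : Nat), lo ≤ hi → hi ≤ l.length → pvBisectGo fn l fuel lo hi ≤ l.length := by
  intro fuel
  induction fuel with
  | zero => intro lo hi hlohi hhilen; rw [pvBisectGo]; omega
  | succ fuel IH =>
    intro lo hi hlohi hhilen
    by_cases h : lo < hi
    · rw [pvBisectGo, if_pos h]
      cases hg : PySem.List.pyGet? l (((lo + hi) / 2 : Nat) : Int) with
      | none => dsimp only; omega
      | some v =>
        dsimp only
        by_cases hv : v < fn
        · rw [if_pos hv]; exact IH _ _ (by omega) hhilen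
        · rw [if_neg hv]; exact IH _ _ (by omega) (by omega)
    · rw [pvBisectGo, if_neg h]; omega

theorem pvBisectGo_main (fn : Int) (l : List Int) (hs : l.Pairwise (· ≤ ·)) :
    ∀ (fuel lo hi : Nat), hi - lo ≤ fuel → lo ≤ hi → hi ≤ l.length →
    (∀ (i : Nat) (h : i < l.length), i < lo → l[i] < fn) →
    (∀ (i : Nat) (h : i < l.length), hi ≤ i → fn ≤ l[i]) →
    pvBisectGo fn l fuel lo hi ≤ l.length ∧
    (∀ (i : Nat) (h : i < l.length), i < pvBisectGo fn l fuel lo hi → l[i] < fn) ∧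
    (∀ (i : Nat) (h : i < l.length), pvBisectGo fn l fuel lo hi ≤ i → fn ≤ l[i]) := by
  intro fuel
  induction fuel with
  | zero =>
    intro lo hi hfuel hlohi hhilen hL hR
    rw [pvBisectGo]
    exact ⟨by omega, hL, fun i hi' hge => hR i hi' (by omega)⟩
  | succ fuel IH =>
    intro lo hi hfuel hlohi hhilen hL hR
    by_cases h : lo < hi
    · have hmidlt : (lo + hi) / 2 < l.length := by omega
      have hget : PySem.List.pyGet? l (((lo + hi) / 2 : Nat) : Int)
          = some l[(lo + hi) / 2] := by
        rw [PySem.List.pyGet?_natCast, List.getElem?_eq_getElem hmidlt]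
      rw [pvBisectGo, if_pos h, hget]
      dsimp only
      have hmono : ∀ (i j : Nat) (hi' : i < l.length) (hj' : j < l.length),
          i ≤ j → l[i] ≤ l[j] := by
        intro i j hi' hj' hij
        rcases Nat.lt_or_ge i j with hlt' | hge
        · exact (List.pairwise_iff_getElem.mp hs) i j hi' hj' hlt'
        · have : i = j := by omega
          subst this; exact le_refl _
      by_cases hv : l[(lo + hi) / 2] < fn
      · rw [if_pos hv]
        exact IH ((lo + hi) / 2 + 1) hi (by omega) (by omega) hhilen
          (fun i hi' hilt => lt_of_le_of_lt (hmono i ((lo + hi) / 2) hi' hmidlt (by omega)) hv)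
          hR
      · rw [if_neg hv]
        push_neg at hv
        exact IH lo ((lo + hi) / 2) (by omega) (by omega) (by omega) hL
          (fun i hi' hge => le_trans hv (hmono ((lo + hi) / 2) i hmidlt hi' hge))
    · rw [pvBisectGo, if_neg h]
      exact ⟨by omega, hL, fun i hi' hge => hR i hi' (by omega)⟩

-- ===== VERDICT (by name: the statement is the Claim_ definition above) =====
theorem prev_frame_in_cluster_spec : Claim_equal_prev_frame_in_cluster := by
  intro fn l _ hpre0
  unfold Pre_prev_frame_in_cluster at hpre0
  by_cases hmem : fn ∈ l
  case neg =>
    -- frame_num absent: A's scan finds nothing, B's presence check fails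
    unfold Spec_prev_frame_in_cluster prev_frame_in_cluster prev_frame_in_cluster_alt
    rw [pvFindIdxA_none fn l (fun x hx hxfn => hmem (hxfn ▸ hx))]
    dsimp only
    set r := pvBisect fn l 0 l.length with hr
    rw [pvBisect] at hr
    have hrlen : r ≤ l.length := hr ▸ pvBisectGo_le fn l _ 0 l.length (Nat.zero_le _) (le_refl _)
    by_cases hcond : r = 0 ∨ r = l.length
    · simp [if_pos hcond]
    · rw [if_neg hcond]
      push_neg at hcond
      have hrl : r < l.length := by omega
      have hgetr : PySem.List.pyGet? l (r : Int) = some l[r] := by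
        rw [PySem.List.pyGet?_natCast, List.getElem?_eq_getElem hrl]
      rw [hgetr]
      dsimp only
      rw [if_pos (show l[r] ≠ fn from fun heq => hmem (heq ▸ List.getElem_mem hrl))]
  case pos =>
  have hpre : l.Pairwise (· ≤ ·) := hpre0.resolve_right (fun h => h hmem)
  unfold Spec_prev_frame_in_cluster prev_frame_in_cluster prev_frame_in_cluster_alt
  obtain ⟨hrlen, hLt, hGe⟩ := pvBisectGo_main fn l hpre (l.length - 0) 0 l.length
    (le_refl _) (Nat.zero_le _) (le_refl _)
    (fun i _ hi0 => absurd hi0 (Nat.not_lt_zero i))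
    (fun i hi' hge => absurd hi' (by omega))
  set r := pvBisect fn l 0 l.length with hr
  rw [pvBisect] at hr
  by_cases hpresent : ∃ (h : r < l.length), l[r] = fn
  · obtain ⟨hrl, hval⟩ := hpresent
    have hfind : pvFindIdxA fn l 0 = some r :=
      pvFindIdxA_some fn l r hrl hval
        (fun i hi' hir => ne_of_lt (hLt i hi' hir))
    rw [hfind]
    dsimp only
    by_cases hr0 : r = 0
    · simp [hr0]
    · have hcond : ¬ (r = 0 ∨ r = l.length) := by
        push_neg; exact ⟨hr0, by omega⟩
      rw [if_neg hr0, if_neg hcond]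
      have hgetr : PySem.List.pyGet? l (r : Int) = some l[r] := by
        rw [PySem.List.pyGet?_natCast, List.getElem?_eq_getElem hrl]
      rw [hgetr]
      dsimp only
      rw [if_neg (by simpa using hval)]
  · -- fn does not occur in l: both sides return none
    have hnone : pvFindIdxA fn l 0 = none := by
      apply pvFindIdxA_none
      intro x hx hxfn
      obtain ⟨i, hi', hxi⟩ := List.mem_iff_getElem.mp hx
      rcases Nat.lt_or_ge i r with hir | hri
      · exact absurd (hxi ▸ hxfn) (ne_of_lt (hLt i hi' hir))
      · have hrl : r < l.length := by omega
        have h1 : fn ≤ l[r] := hGe r hrl (le_refl r)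
        have h2 : l[r] ≤ l[i] := by
          rcases Nat.lt_or_ge r i with hlt' | hge'
          · exact (List.pairwise_iff_getElem.mp hpre) r i hrl hi' hlt'
          · have : r = i := by omega
            subst this; exact le_refl _
        have : l[r] = fn := le_antisymm (by omega) h1
        exact hpresent ⟨hrl, this⟩
    rw [hnone]
    dsimp only
    by_cases hcond : r = 0 ∨ r = l.length
    · simp [if_pos hcond]
    · rw [if_neg hcond]
      push_neg at hcond
      have hrl : r < l.length := by omega
      have hgetr : PySem.List.pyGet? l (r : Int) = some l[r] := by
        rw [PySem.List.pyGet?_natCast, List.getElem?_eq_getElem hrl]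
      rw [hgetr]
      dsimp only
      rw [if_pos (fun heq => hpresent ⟨hrl, heq⟩)]
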